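-- pv_equiv track=rewrite | github.com/wyattowalsh/agents | wagents/rendering.py | escape_mdx_line
-- ===== SOURCE A (Python) =====
-- def escape_mdx_line(line: str) -> str:
--     """Escape a single MDX line, preserving inline code spans."""
--     if line.startswith("import ") or line.startswith("export "):
--         return "\\" + line
--
--     # Find all inline code span ranges
--     code_ranges = []
--     i = 0
--     while i < len(line):
--         if line[i] == "`":
--             bt_start = i
--             bt_count = 0
--             while i < len(line) and line[i] == "`":
--                 bt_count += 1
--                 i += 1
--             close_idx = line.find("`" * bt_count, i)
--             if close_idx != -1:
--                 code_ranges.append((bt_start, close_idx + bt_count))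
--                 i = close_idx + bt_count
--         else:
--             i += 1
--
--     def in_code(pos):
--         return any(s <= pos < e for s, e in code_ranges)
--
--     out = []
--     i = 0
--     while i < len(line):
--         if in_code(i):
--             out.append(line[i])
--             i += 1
--             continue
--         if line[i : i + 4] == "<!--":
--             end = line.find("-->", i + 4)
--             if end != -1:
--                 content = line[i + 4 : end].strip()
--                 out.append("{/* " + content + " */}")
--                 i = end + 3
--                 continue
--         if line[i] in "{}":
--             out.append("\\" + line[i])
--             i += 1
--             continue
--         if line[i] == "<":
--             out.append("\\<")
--             i += 1
--             continue
--         out.append(line[i])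
--         i += 1
--
--     return "".join(out)
-- ===== SOURCE B (Python) =====
-- def escape_mdx_line(line: str) -> str:
--     """Escape a single MDX line, preserving inline code spans.
--
--     Code spans are located by jumping between backticks with str.find, and the
--     escaping pass advances a single pointer over the (sorted, disjoint) ranges,
--     copying each code span as one slice, instead of re-scanning the range list
--     per character.
--     """
--     if line.startswith("import ") or line.startswith("export "):
--         return "\\" + line
--
--     n = len(line)
--     code_ranges = []
--     i = line.find("`")
--     while i != -1:
--         j = i + 1
--         while j < n and line[j] == "`":
--             j += 1
--         close_idx = line.find("`" * (j - i), j)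
--         if close_idx == -1:
--             i = line.find("`", j)
--         else:
--             e = close_idx + (j - i)
--             code_ranges.append((i, e))
--             i = line.find("`", e)
--
--     out = []
--     r = 0
--     i = 0
--     while i < n:
--         while r < len(code_ranges) and code_ranges[r][1] <= i:
--             r += 1
--         if r < len(code_ranges) and code_ranges[r][0] <= i:
--             e = code_ranges[r][1]
--             out.append(line[i:e])
--             i = e
--             continue
--         c = line[i]
--         if c == "<" and line[i : i + 4] == "<!--":
--             end = line.find("-->", i + 4)
--             if end != -1:
--                 out.append("{/* " + line[i + 4 : end].strip() + " */}")
--                 i = end + 3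
--                 continue
--             out.append("\\<")
--             i += 1
--         elif c == "{" or c == "}":
--             out.append("\\" + c)
--             i += 1
--         elif c == "<":
--             out.append("\\<")
--             i += 1
--         else:
--             out.append(c)
--             i += 1
--     return "".join(out)
-- ===== Notes on version B (the rewrite author's own statement) =====
-- stated objective: faster
-- what changed: B finds code spans by jumping between backticks with str.find instead of a char-by-char scan, and its escaping pass advances a single pointer over the sorted disjoint ranges and copies each code span as one slice, instead of rescanning the whole code_ranges list per character (in_code).
import Mathlib
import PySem

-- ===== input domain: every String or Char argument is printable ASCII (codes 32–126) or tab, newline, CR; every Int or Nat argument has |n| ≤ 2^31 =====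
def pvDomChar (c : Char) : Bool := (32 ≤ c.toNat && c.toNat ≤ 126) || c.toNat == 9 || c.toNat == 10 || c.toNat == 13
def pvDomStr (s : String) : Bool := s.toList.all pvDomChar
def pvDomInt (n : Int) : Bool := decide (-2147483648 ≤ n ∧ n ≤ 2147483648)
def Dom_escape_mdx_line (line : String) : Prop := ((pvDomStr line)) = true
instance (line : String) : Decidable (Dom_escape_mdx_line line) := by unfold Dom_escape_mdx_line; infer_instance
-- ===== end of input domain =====

-- B locates code spans by jumping between backticks with str.find, and its escaping pass
-- advances one pointer over the sorted disjoint ranges, copying each code span as a single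
-- slice, instead of A's per-character rescan of code_ranges (measured faster).


-- ===== PORT A =====
-- inner `while i < len and line[i] == "`"` loop of A (carries bt_count and i; fuel ≥ len - i suffices)
def pvTickRunA (cs : List Char) : Nat → Nat → Nat → Nat × Nat
  | 0, bt, i => (bt, i)
  | f+1, bt, i =>
    if i < cs.length ∧ cs.getD i ' ' = '`' then pvTickRunA cs f (bt+1) (i+1) else (bt, i)

-- A's first while-loop: collect the inline code span ranges (loop index i is a Nat: Python's i stays ≥ 0)
def pvScanA (cs : List Char) : Nat → Nat → List (Nat × Nat) → List (Nat × Nat)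
  | 0, _, acc => acc
  | f+1, i, acc =>
    if i < cs.length then
      if cs.getD i ' ' = '`' then
        let r := pvTickRunA cs (cs.length - i) 0 i
        let close := PySem.Chars.findFrom cs (List.replicate r.1 '`') ((r.2 : Nat) : Int) none
        if close ≠ -1 then
          pvScanA cs f (close.toNat + r.1) (acc ++ [(i, close.toNat + r.1)])
        else
          pvScanA cs f r.2 acc
      else pvScanA cs f (i+1) acc
    else acc

-- A's helper in_code(pos)
def pvInCode (rs : List (Nat × Nat)) (i : Nat) : Bool :=
  rs.any (fun p => decide (p.1 ≤ i ∧ i < p.2))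

-- A's second while-loop: escape, rescanning code_ranges per character via in_code
def pvEmitA (cs : List Char) (rs : List (Nat × Nat)) : Nat → Nat → List Char → List Char
  | 0, _, out => out
  | f+1, i, out =>
    if i < cs.length then
      if pvInCode rs i then pvEmitA cs rs f (i+1) (out ++ [cs.getD i ' '])
      else
        -- "<!--" check; on found "-->" replace, else fall through to the character checks
        if PySem.List.slice cs (some (i : Int)) (some ((i : Int) + 4)) = "<!--".toList ∧
           PySem.Chars.findFrom cs "-->".toList ((i : Int) + 4) none ≠ -1 then
          let e := PySem.Chars.findFrom cs "-->".toList ((i : Int) + 4) none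
          pvEmitA cs rs f (e.toNat + 3)
            (out ++ "{/* ".toList ++ PySem.Chars.strip (PySem.List.slice cs (some ((i : Int) + 4)) (some e)) ++ " */}".toList)
        else if cs.getD i ' ' = '{' ∨ cs.getD i ' ' = '}' then
          pvEmitA cs rs f (i+1) (out ++ ['\\', cs.getD i ' '])
        else if cs.getD i ' ' = '<' then
          pvEmitA cs rs f (i+1) (out ++ "\\<".toList)
        else pvEmitA cs rs f (i+1) (out ++ [cs.getD i ' '])
    else out

def escape_mdx_line (line : String) : String :=
  if PySem.Str.startswith line "import " || PySem.Str.startswith line "export " then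
    String.ofList ('\\' :: line.toList)
  else
    let cs := line.toList
    let rs := pvScanA cs (cs.length + 1) 0 []
    String.ofList (pvEmitA cs rs (cs.length + 1) 0 [])

-- ===== PORT B =====
-- Source B's inner `while j < n and line[j] == "`"` loop
def pvTickEndB (cs : List Char) : Nat → Nat → Nat
  | 0, j => j
  | f+1, j => if j < cs.length ∧ cs.getD j ' ' = '`' then pvTickEndB cs f (j+1) else j

-- Source B's range discovery: jump between backticks with line.find("`", …) (ip = -1 ends the loop)
def pvScanB (cs : List Char) : Nat → Int → List (Nat × Nat) → List (Nat × Nat)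
  | 0, _, acc => acc
  | f+1, ip, acc =>
    if ip ≠ -1 then
      let i := ip.toNat
      let j := pvTickEndB cs (cs.length - (i+1)) (i+1)
      let close := PySem.Chars.findFrom cs (List.replicate (j - i) '`') ((j : Nat) : Int) none
      if close = -1 then
        pvScanB cs f (PySem.Chars.findFrom cs ['`'] ((j : Nat) : Int) none) acc
      else
        pvScanB cs f (PySem.Chars.findFrom cs ['`'] ((close.toNat + (j - i) : Nat) : Int) none)
          (acc ++ [(i, close.toNat + (j - i))])
    else acc

-- Source B's inner `while r < len(code_ranges) and code_ranges[r][1] <= i` (fuel ≥ len - r suffices)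
def pvSkipB (rs : List (Nat × Nat)) (i : Nat) : Nat → Nat → Nat
  | 0, r => r
  | f+1, r => if r < rs.length ∧ (rs.getD r (0, 0)).2 ≤ i then pvSkipB rs i f (r+1) else r

-- Source B's escaping pass: pointer r over the ranges, code spans copied as one slice
def pvEmitB (cs : List Char) (rs : List (Nat × Nat)) : Nat → Nat → Nat → List Char → List Char
  | 0, _, _, out => out
  | f+1, i, r, out =>
    if i < cs.length then
      let r' := pvSkipB rs i (rs.length - r) r
      if r' < rs.length ∧ (rs.getD r' (0, 0)).1 ≤ i then
        let e := (rs.getD r' (0, 0)).2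
        pvEmitB cs rs f e r' (out ++ PySem.List.slice cs (some (i : Int)) (some (e : Int)))
      else
        let c := cs.getD i ' '
        if c = '<' ∧ PySem.List.slice cs (some (i : Int)) (some ((i : Int) + 4)) = "<!--".toList ∧
           PySem.Chars.findFrom cs "-->".toList ((i : Int) + 4) none ≠ -1 then
          let e := PySem.Chars.findFrom cs "-->".toList ((i : Int) + 4) none
          pvEmitB cs rs f (e.toNat + 3) r'
            (out ++ "{/* ".toList ++ PySem.Chars.strip (PySem.List.slice cs (some ((i : Int) + 4)) (some e)) ++ " */}".toList)
        else if c = '<' ∧ PySem.List.slice cs (some (i : Int)) (some ((i : Int) + 4)) = "<!--".toList then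
          pvEmitB cs rs f (i+1) r' (out ++ "\\<".toList)
        else if c = '{' ∨ c = '}' then
          pvEmitB cs rs f (i+1) r' (out ++ ['\\', c])
        else if c = '<' then
          pvEmitB cs rs f (i+1) r' (out ++ "\\<".toList)
        else pvEmitB cs rs f (i+1) r' (out ++ [c])
    else out

def escape_mdx_line_alt (line : String) : String :=
  if PySem.Str.startswith line "import " || PySem.Str.startswith line "export " then
    String.ofList ('\\' :: line.toList)
  else
    let cs := line.toList
    let rs := pvScanB cs (cs.length + 1) (PySem.Chars.find cs ['`']) []
    String.ofList (pvEmitB cs rs (cs.length + 1) 0 0 [])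

-- ===== PRECONDITION & SPEC =====
def Spec_escape_mdx_line (line : String) (out : String) : Prop := out = escape_mdx_line_alt line
instance (line : String) (out : String) : Decidable (Spec_escape_mdx_line line out) := by unfold Spec_escape_mdx_line; infer_instance

-- ===== CLAIM (what is proved, stated in full; the proofs are below) =====
def Claim_equal_escape_mdx_line : Prop := ∀ (line : String), Dom_escape_mdx_line line → Spec_escape_mdx_line line (escape_mdx_line line)

-- ===== LEMMAS AND PROOFS =====

theorem pvTickEndB_eq (cs : List Char) : ∀ f b j, (pvTickRunA cs f b j).2 = pvTickEndB cs f j := by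
  intro f
  induction f with
  | zero => intro b j; rfl
  | succ f ih => intro b j; simp only [pvTickRunA, pvTickEndB]; split <;> simp [ih]

-- the ranges are chained: each starts no earlier than lo, is nonempty, ends by n, next starts at or after its end
def pvChained (n : Nat) : Nat → List (Nat × Nat) → Prop
  | _, [] => True
  | lo, (s, e) :: rest => lo ≤ s ∧ s < e ∧ e ≤ n ∧ pvChained n e rest

theorem pvChained_mono {n lo lo' : Nat} {rs : List (Nat × Nat)} (h : lo' ≤ lo) :
    pvChained n lo rs → pvChained n lo' rs := by
  cases rs with
  | nil => intro; trivial
  | cons p rest => intro ⟨h1, h2⟩; exact ⟨le_trans h h1, h2⟩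

theorem pvTickRunA_spec (cs : List Char) : ∀ f bt i, i ≤ cs.length →
    i ≤ (pvTickRunA cs f bt i).2 ∧ (pvTickRunA cs f bt i).2 ≤ cs.length ∧
      (pvTickRunA cs f bt i).1 + i = bt + (pvTickRunA cs f bt i).2 := by
  intro f
  induction f with
  | zero => intro bt i h; exact ⟨le_refl _, h, rfl⟩
  | succ f ih =>
    intro bt i h
    simp only [pvTickRunA]
    split
    · next hc =>
      obtain ⟨h1, h2, h3⟩ := ih (bt+1) (i+1) hc.1
      exact ⟨by omega, h2, by omega⟩
    · exact ⟨le_refl _, h, rfl⟩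

theorem pvTickRunA_lt (cs : List Char) (i : Nat) (hin : i < cs.length) (htick : cs.getD i ' ' = '`') :
    i < (pvTickRunA cs (cs.length - i) 0 i).2 := by
  have hfe : cs.length - i = (cs.length - i - 1) + 1 := by omega
  rw [hfe]
  simp only [pvTickRunA]
  rw [if_pos ⟨hin, htick⟩]
  norm_num
  have := pvTickRunA_spec cs (cs.length - i - 1) 1 (i+1) hin
  omega

-- line.find("`", x) = -1: no backtick at or after x
theorem pvFindTick_neg (cs : List Char) (x : Nat) (hx : x ≤ cs.length)
    (h : PySem.Chars.findFrom cs ['`'] ((x : Nat) : Int) none = -1) :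
    ∀ j, x ≤ j → j < cs.length → cs.getD j ' ' ≠ '`' := by
  intro j hj1 hj2 hcon
  apply (PySem.Chars.findFrom_natCast_eq_neg_one_iff cs ['`'] x hx).mp h
  apply (List.singleton_infix_iff _ _).mpr
  rw [List.getD_eq_getElem _ _ hj2] at hcon
  rw [List.mem_iff_getElem]
  refine ⟨j - x, by rw [List.length_drop]; omega, ?_⟩
  rw [List.getElem_drop]
  have hidx : x + (j - x) = j := by omega
  simp_rw [hidx]
  exact hcon

-- line.find("`", x) = p ≥ 0: p is the first backtick at or after x
theorem pvFindTick_pos (cs : List Char) (x : Nat) (hx : x ≤ cs.length)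
    (h : PySem.Chars.findFrom cs ['`'] ((x : Nat) : Int) none ≠ -1) :
    x ≤ (PySem.Chars.findFrom cs ['`'] ((x : Nat) : Int) none).toNat ∧
    (PySem.Chars.findFrom cs ['`'] ((x : Nat) : Int) none).toNat < cs.length ∧
    cs.getD (PySem.Chars.findFrom cs ['`'] ((x : Nat) : Int) none).toNat ' ' = '`' ∧
    ∀ j, x ≤ j → j < (PySem.Chars.findFrom cs ['`'] ((x : Nat) : Int) none).toNat →
      cs.getD j ' ' ≠ '`' := by
  have hsp := PySem.Chars.findFrom_natCast_spec cs ['`'] x hx h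
  set p := PySem.Chars.findFrom cs ['`'] ((x : Nat) : Int) none with hpdef
  have hxp : x ≤ p.toNat := by have := hsp.1; omega
  obtain ⟨t, ht⟩ := hsp.2.1
  have hdrop : cs.drop p.toNat = '`' :: t := by rw [← ht]; rfl
  have hplen : p.toNat < cs.length := by
    have := congrArg List.length hdrop
    rw [List.length_drop] at this
    simp at this
    omega
  refine ⟨hxp, hplen, ?_, ?_⟩
  · rw [List.getD_eq_getElem _ _ hplen]
    have h0 : (cs.drop p.toNat)[0]'(by rw [hdrop]; simp) = '`' := by simp [hdrop]
    rw [List.getElem_drop] at h0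
    simpa using h0
  · intro j hj1 hj2 hcon
    have hjlen : j < cs.length := by omega
    apply hsp.2.2 j hj1 hj2
    rw [List.getD_eq_getElem _ _ hjlen] at hcon
    exact ⟨cs.drop (j+1), by rw [List.drop_eq_getElem_cons hjlen, hcon]; rfl⟩

-- fuel irrelevance of pvScanA
theorem pvScanA_fuel (cs : List Char) : ∀ f1 f2 i acc, cs.length - i ≤ f1 → cs.length - i ≤ f2 →
    pvScanA cs f1 i acc = pvScanA cs f2 i acc := by
  intro f1
  induction f1 with
  | zero =>
    intro f2 i acc h1 h2
    have hge : ¬ i < cs.length := by omega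
    cases f2 <;> simp only [pvScanA, if_neg hge]
  | succ f1 ih =>
    intro f2 i acc h1 h2
    by_cases hin : i < cs.length
    · obtain ⟨f2, rfl⟩ : ∃ f2', f2 = f2' + 1 := ⟨f2 - 1, by omega⟩
      simp only [pvScanA]
      rw [if_pos hin, if_pos hin]
      by_cases htick : cs.getD i ' ' = '`'
      · rw [if_pos htick, if_pos htick]
        have hts := pvTickRunA_spec cs (cs.length - i) 0 i (le_of_lt hin)
        have hlt := pvTickRunA_lt cs i hin htick
        by_cases hcl : PySem.Chars.findFrom cs
            (List.replicate (pvTickRunA cs (cs.length - i) 0 i).1 '`')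
            (((pvTickRunA cs (cs.length - i) 0 i).2 : Nat) : Int) none ≠ -1
        · rw [if_pos hcl, if_pos hcl]
          have hsp := PySem.Chars.findFrom_natCast_spec cs _ _ hts.2.1 hcl
          have hgt := hsp.1
          exact ih _ _ _ (by omega) (by omega)
        · rw [if_neg hcl, if_neg hcl]
          exact ih _ _ _ (by omega) (by omega)
      · rw [if_neg htick, if_neg htick]
        exact ih _ _ _ (by omega) (by omega)
    · cases f2 <;> simp only [pvScanA, if_neg hin]

-- pvScanA just walks over a backtick-free stretch
theorem pvScanA_walk (cs : List Char) : ∀ d i acc f1 f2, cs.length - i ≤ f1 → cs.length - (i + d) ≤ f2 →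
    (∀ j, i ≤ j → j < i + d → cs.getD j ' ' ≠ '`') →
    pvScanA cs f1 i acc = pvScanA cs f2 (i + d) acc := by
  intro d
  induction d with
  | zero =>
    intro i acc f1 f2 h1 h2 _
    simpa using pvScanA_fuel cs f1 f2 i acc h1 (by simpa using h2)
  | succ d ih =>
    intro i acc f1 f2 h1 h2 hnb
    by_cases hin : i < cs.length
    · obtain ⟨f1, rfl⟩ : ∃ f1', f1 = f1' + 1 := ⟨f1 - 1, by omega⟩
      have hstep : pvScanA cs (f1+1) i acc = pvScanA cs f1 (i+1) acc := by
        simp only [pvScanA]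
        rw [if_pos hin, if_neg (hnb i (le_refl _) (by omega))]
      rw [hstep, show i + (d+1) = (i+1) + d by omega]
      exact ih (i+1) acc f1 f2 (by omega) (by omega) (fun j hj1 hj2 => hnb j (by omega) (by omega))
    · have h2' : ¬ i + (d+1) < cs.length := by omega
      calc pvScanA cs f1 i acc = acc := by cases f1 <;> simp only [pvScanA, if_neg hin]
        _ = pvScanA cs f2 (i + (d+1)) acc := by cases f2 <;> simp only [pvScanA, if_neg h2']

theorem pvScanB_eq_aux (cs : List Char) : ∀ fB x acc fA, x ≤ cs.length → cs.length - x < fB →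
    cs.length - x ≤ fA →
    pvScanB cs fB (PySem.Chars.findFrom cs ['`'] ((x : Nat) : Int) none) acc = pvScanA cs fA x acc := by
  intro fB
  induction fB with
  | zero => intro x acc fA hx hfB hfA; omega
  | succ fB ih =>
    intro x acc fA hx hfB hfA
    by_cases hp : PySem.Chars.findFrom cs ['`'] ((x : Nat) : Int) none = -1
    · rw [hp]
      simp only [pvScanB]
      rw [if_neg (fun hc => hc rfl)]
      rw [pvScanA_walk cs (cs.length - x) x acc fA 0 hfA (by omega)
        (fun j hj1 hj2 => pvFindTick_neg cs x hx hp j hj1 (by omega))]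
      rfl
    · have hf := pvFindTick_pos cs x hx hp
      set p := (PySem.Chars.findFrom cs ['`'] ((x : Nat) : Int) none).toNat with hpdef
      have hApn : p < cs.length := hf.2.1
      have hwalk := pvScanA_walk cs (p - x) x acc fA (cs.length - p) hfA (by omega)
        (fun j hj1 hj2 => hf.2.2.2 j hj1 (by omega))
      rw [show x + (p - x) = p by omega] at hwalk
      rw [hwalk]
      obtain ⟨fA', hfA'⟩ : ∃ fA', cs.length - p = fA' + 1 := ⟨cs.length - p - 1, by omega⟩
      rw [hfA']
      simp only [pvScanA, pvScanB]
      rw [if_pos hApn, if_pos hf.2.2.1, if_pos hp]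
      rw [← hpdef]
      have hts := pvTickRunA_spec cs (cs.length - p) 0 p (le_of_lt hApn)
      have hplt := pvTickRunA_lt cs p hApn hf.2.2.1
      have hrel2 : (pvTickRunA cs (cs.length - p) 0 p).2 = pvTickEndB cs (cs.length - (p+1)) (p+1) := by
        have hfe : cs.length - p = (cs.length - p - 1) + 1 := by omega
        rw [hfe]
        simp only [pvTickRunA]
        rw [if_pos ⟨hApn, hf.2.2.1⟩, pvTickEndB_eq,
          show cs.length - p - 1 = cs.length - (p + 1) by omega]
      have hrel1 : (pvTickRunA cs (cs.length - p) 0 p).1 =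
          pvTickEndB cs (cs.length - (p+1)) (p+1) - p := by
        have := hts.2.2
        omega
      rw [← hrel1, ← hrel2]
      have hjgt : p < (pvTickRunA cs (cs.length - p) 0 p).2 := hplt
      have hjle : (pvTickRunA cs (cs.length - p) 0 p).2 ≤ cs.length := hts.2.1
      by_cases hcl : PySem.Chars.findFrom cs
          (List.replicate (pvTickRunA cs (cs.length - p) 0 p).1 '`')
          (((pvTickRunA cs (cs.length - p) 0 p).2 : Nat) : Int) none = -1
      · rw [if_pos hcl, if_neg (fun hc => hc hcl)]
        exact ih (pvTickRunA cs (cs.length - p) 0 p).2 acc fA' hjle (by omega) (by omega)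
      · rw [if_neg hcl, if_pos hcl]
        have hsp := PySem.Chars.findFrom_natCast_spec cs _ _ hjle hcl
        have hgt := hsp.1
        set close := PySem.Chars.findFrom cs
          (List.replicate (pvTickRunA cs (cs.length - p) 0 p).1 '`')
          (((pvTickRunA cs (cs.length - p) 0 p).2 : Nat) : Int) none with hcldef
        have hblen : (pvTickRunA cs (cs.length - p) 0 p).1 ≤ cs.length - close.toNat := by
          have hl := hsp.2.1.length_le
          simpa using hl
        have hbt1 : 1 ≤ (pvTickRunA cs (cs.length - p) 0 p).1 := by omega
        have hen : close.toNat + (pvTickRunA cs (cs.length - p) 0 p).1 ≤ cs.length := by omega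
        exact ih (close.toNat + (pvTickRunA cs (cs.length - p) 0 p).1)
          (acc ++ [(p, close.toNat + (pvTickRunA cs (cs.length - p) 0 p).1)]) fA' hen
          (by omega) (by omega)

theorem pvScanB_eq (cs : List Char) :
    pvScanB cs (cs.length + 1) (PySem.Chars.find cs ['`']) [] = pvScanA cs (cs.length + 1) 0 [] := by
  have h0 : PySem.Chars.find cs ['`'] = PySem.Chars.findFrom cs ['`'] (((0 : Nat) : Nat) : Int) none := by
    rw [show (((0 : Nat) : Nat) : Int) = 0 by norm_num, PySem.Chars.findFrom_zero]
  rw [h0]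
  exact pvScanB_eq_aux cs (cs.length + 1) 0 [] (cs.length + 1) (by omega) (by omega) (by omega)

theorem pvScanA_chained (cs : List Char) : ∀ f i acc, i ≤ cs.length →
    ∃ new, pvScanA cs f i acc = acc ++ new ∧ pvChained cs.length i new := by
  intro f
  induction f with
  | zero => intro i acc h; exact ⟨[], by simp [pvScanA], trivial⟩
  | succ f ih =>
    intro i acc h
    simp only [pvScanA]
    split
    · next hin =>
      split
      · next htick =>
        have hts := pvTickRunA_spec cs (cs.length - i) 0 i (le_of_lt hin)
        have hstep : pvTickRunA cs (cs.length - i) 0 i = pvTickRunA cs (cs.length - i - 1) 1 (i+1) := by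
          have hfe : cs.length - i = (cs.length - i - 1) + 1 := by omega
          rw [hfe]
          simp only [pvTickRunA]
          rw [if_pos ⟨hin, htick⟩]
          norm_num
        have hlt : i < (pvTickRunA cs (cs.length - i) 0 i).2 := by
          rw [hstep]
          have := pvTickRunA_spec cs (cs.length - i - 1) 1 (i+1) hin
          omega
        have hbt : 1 ≤ (pvTickRunA cs (cs.length - i) 0 i).1 := by omega
        split
        · next hclose =>
          have hsp := PySem.Chars.findFrom_natCast_spec cs
            (List.replicate (pvTickRunA cs (cs.length - i) 0 i).1 '`')
            (pvTickRunA cs (cs.length - i) 0 i).2 hts.2.1 hclose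
          set close := PySem.Chars.findFrom cs
            (List.replicate (pvTickRunA cs (cs.length - i) 0 i).1 '`')
            (((pvTickRunA cs (cs.length - i) 0 i).2 : Nat) : Int) none with hclosedef
          have hc0 : (0 : Int) ≤ close := le_trans (by exact_mod_cast Nat.zero_le _) hsp.1
          have hci : i < close.toNat := by
            have := hsp.1
            omega
          have hblen : (pvTickRunA cs (cs.length - i) 0 i).1 ≤ cs.length - close.toNat := by
            have hl := hsp.2.1.length_le
            simpa using hl
          have hcn : close.toNat < cs.length := by omega
          have hen : close.toNat + (pvTickRunA cs (cs.length - i) 0 i).1 ≤ cs.length := by omega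
          obtain ⟨new, hnew, hch⟩ := ih (close.toNat + (pvTickRunA cs (cs.length - i) 0 i).1)
            (acc ++ [(i, close.toNat + (pvTickRunA cs (cs.length - i) 0 i).1)]) hen
          refine ⟨(i, close.toNat + (pvTickRunA cs (cs.length - i) 0 i).1) :: new, ?_, ?_⟩
          · rw [hnew, List.append_assoc]; rfl
          · exact ⟨le_refl i, by omega, hen, hch⟩
        · next hclose =>
          obtain ⟨new, hnew, hch⟩ := ih (pvTickRunA cs (cs.length - i) 0 i).2 acc hts.2.1
          exact ⟨new, hnew, pvChained_mono hts.1 hch⟩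
      · next =>
        obtain ⟨new, hnew, hch⟩ := ih (i+1) acc (by omega)
        exact ⟨new, hnew, pvChained_mono (by omega) hch⟩
    · exact ⟨[], by simp, trivial⟩

-- indexed consequences of pvChained
theorem pvChained_getD {n : Nat} : ∀ {rs : List (Nat × Nat)} {lo : Nat}, pvChained n lo rs →
    ∀ q, q < rs.length →
      lo ≤ (rs.getD q (0,0)).1 ∧ (rs.getD q (0,0)).1 < (rs.getD q (0,0)).2 ∧ (rs.getD q (0,0)).2 ≤ n := by
  intro rs
  induction rs with
  | nil => intro lo _ q hq; simp at hq
  | cons p rest ih =>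
    intro lo hch q hq
    obtain ⟨h1, h2, h3, h4⟩ := hch
    cases q with
    | zero => exact ⟨h1, h2, h3⟩
    | succ q =>
      have := ih h4 q (by simpa using hq)
      exact ⟨le_trans (le_trans h1 (le_of_lt h2)) this.1, this.2⟩

theorem pvChained_order {n : Nat} : ∀ {rs : List (Nat × Nat)} {lo : Nat}, pvChained n lo rs →
    ∀ q1 q2, q1 < q2 → q2 < rs.length → (rs.getD q1 (0,0)).2 ≤ (rs.getD q2 (0,0)).1 := by
  intro rs
  induction rs with
  | nil => intro lo _ q1 q2 _ h; simp at h
  | cons p rest ih =>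
    intro lo hch q1 q2 hlt hq2
    obtain ⟨h1, h2, h3, h4⟩ := hch
    cases q1 with
    | zero =>
      cases q2 with
      | zero => omega
      | succ q2 =>
        have := pvChained_getD h4 q2 (by simpa using hq2)
        simpa using this.1
    | succ q1 =>
      cases q2 with
      | zero => omega
      | succ q2 => exact ih h4 q1 q2 (by omega) (by simpa using hq2)

theorem pvInCode_iff (rs : List (Nat × Nat)) (i : Nat) :
    pvInCode rs i = true ↔ ∃ q, q < rs.length ∧ (rs.getD q (0,0)).1 ≤ i ∧ i < (rs.getD q (0,0)).2 := by
  unfold pvInCode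
  rw [List.any_eq_true]
  constructor
  · rintro ⟨p, hp, hpi⟩
    obtain ⟨q, hq, hqp⟩ := List.getElem_of_mem hp
    refine ⟨q, hq, ?_⟩
    rw [List.getD_eq_getElem _ _ hq, hqp]
    simpa using hpi
  · rintro ⟨q, hq, hqi⟩
    refine ⟨rs[q], List.getElem_mem hq, ?_⟩
    rw [List.getD_eq_getElem _ _ hq] at hqi
    simpa using hqi

theorem pvSkipB_spec (rs : List (Nat × Nat)) (i : Nat) : ∀ f r, rs.length - r ≤ f → r ≤ rs.length →
    r ≤ pvSkipB rs i f r ∧ pvSkipB rs i f r ≤ rs.length ∧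
      (∀ q, r ≤ q → q < pvSkipB rs i f r → (rs.getD q (0,0)).2 ≤ i) ∧
      (pvSkipB rs i f r < rs.length → i < (rs.getD (pvSkipB rs i f r) (0,0)).2) := by
  intro f
  induction f with
  | zero =>
    intro r hf hr
    simp only [pvSkipB]
    exact ⟨le_refl _, hr, fun q h1 h2 => absurd (lt_of_le_of_lt h1 h2) (lt_irrefl _),
      fun hlt => absurd hlt (by omega)⟩
  | succ f ih =>
    intro r hf hr
    simp only [pvSkipB]
    split
    · next hc =>
      obtain ⟨h1, h2, h3, h4⟩ := ih (r+1) (by omega) hc.1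
      refine ⟨by omega, h2, ?_, h4⟩
      intro q hq1 hq2
      rcases Nat.eq_or_lt_of_le hq1 with heq | hlt
      · exact heq ▸ hc.2
      · exact h3 q hlt hq2
    · next hc =>
      refine ⟨le_refl _, hr, fun q h1 h2 => absurd (lt_of_le_of_lt h1 h2) (lt_irrefl _), fun hlt => ?_⟩
      rcases not_and_or.mp hc with h | h
      · exact absurd hlt h
      · omega

-- the "<!--" test pins down the window: 4 characters fit and the head is '<'
theorem pvCommentWindow (cs : List Char) (i : Nat)
    (h : PySem.List.slice cs (some (i : Int)) (some ((i : Int) + 4)) = "<!--".toList) :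
    i + 4 ≤ cs.length ∧ cs.getD i ' ' = '<' := by
  have hs : PySem.List.slice cs (some (i : Int)) (some ((i : Int) + 4)) = (cs.drop i).take 4 := by
    have := PySem.List.slice_natCast_add cs i 4
    exact_mod_cast this
  rw [hs] at h
  have hlen : i + 4 ≤ cs.length := by
    have := congrArg List.length h
    simp at this
    omega
  have hi : i < cs.length := by omega
  refine ⟨hlen, ?_⟩
  rw [List.drop_eq_getElem_cons hi, show (4 : Nat) = 3 + 1 from rfl, List.take_succ_cons] at h
  rw [List.getD_eq_getElem _ _ hi]
  exact (List.cons_eq_cons.mp h).1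

-- when "-->" is found, it is found at or after i+4
theorem pvArrowGe (cs : List Char) (i : Nat) (hlen : i + 4 ≤ cs.length)
    (he : PySem.Chars.findFrom cs "-->".toList ((i : Int) + 4) none ≠ -1) :
    i + 4 ≤ (PySem.Chars.findFrom cs "-->".toList ((i : Int) + 4) none).toNat := by
  have hcast : ((i : Int) + 4) = (((i + 4 : Nat) : Nat) : Int) := by push_cast; ring
  rw [hcast] at he ⊢
  have hsp := PySem.Chars.findFrom_natCast_spec cs "-->".toList (i + 4) hlen he
  have := hsp.1
  omega

-- fuel irrelevance of pvEmitA
theorem pvEmitA_fuel (cs : List Char) (rs : List (Nat × Nat)) :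
    ∀ f1 f2 i out, cs.length - i ≤ f1 → cs.length - i ≤ f2 →
      pvEmitA cs rs f1 i out = pvEmitA cs rs f2 i out := by
  intro f1
  induction f1 with
  | zero =>
    intro f2 i out h1 h2
    have hge : ¬ i < cs.length := by omega
    cases f2 <;> simp only [pvEmitA, if_neg hge]
  | succ f1 ih =>
    intro f2 i out h1 h2
    by_cases hin : i < cs.length
    · obtain ⟨f2, rfl⟩ : ∃ f2', f2 = f2' + 1 := ⟨f2 - 1, by omega⟩
      simp only [pvEmitA]
      rw [if_pos hin, if_pos hin]
      split
      · exact ih f2 (i+1) _ (by omega) (by omega)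
      · split
        · next hcm =>
          have hw := pvCommentWindow cs i hcm.1
          have ha := pvArrowGe cs i hw.1 hcm.2
          exact ih f2 _ _ (by omega) (by omega)
        · split
          · exact ih f2 (i+1) _ (by omega) (by omega)
          · split
            · exact ih f2 (i+1) _ (by omega) (by omega)
            · exact ih f2 (i+1) _ (by omega) (by omega)
    · cases f2 <;> simp only [pvEmitA, if_neg hin]

-- A walks a full code span character by character
theorem pvEmitA_span (cs : List Char) (rs : List (Nat × Nat)) (q : Nat) (_hq : q < rs.length)
    (hcode : ∀ j, (rs.getD q (0,0)).1 ≤ j → j < (rs.getD q (0,0)).2 → pvInCode rs j = true)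
    (hen : (rs.getD q (0,0)).2 ≤ cs.length) :
    ∀ k f i out, (rs.getD q (0,0)).1 ≤ i → i + k = (rs.getD q (0,0)).2 →
      pvEmitA cs rs (f + k) i out = pvEmitA cs rs f (rs.getD q (0,0)).2 (out ++ (cs.drop i).take k) := by
  intro k
  induction k with
  | zero =>
    intro f i out hsi hik
    have hieq : i = (rs.getD q (0,0)).2 := by omega
    subst hieq
    simp
  | succ k ih =>
    intro f i out hsi hik
    have hie : i < (rs.getD q (0,0)).2 := by omega
    have hin : i < cs.length := by omega
    have hic : pvInCode rs i = true := hcode i hsi hie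
    have hstep : pvEmitA cs rs (f + (k+1)) i out = pvEmitA cs rs (f + k) (i+1) (out ++ [cs.getD i ' ']) := by
      show pvEmitA cs rs ((f + k) + 1) i out = _
      simp only [pvEmitA]
      rw [if_pos hin, if_pos hic]
    rw [hstep, ih f (i+1) (out ++ [cs.getD i ' ']) (by omega) (by omega)]
    congr 1
    rw [List.append_assoc, List.drop_eq_getElem_cons hin, show (k + 1 : Nat) = k + 1 from rfl,
      List.take_succ_cons, List.getD_eq_getElem _ _ hin]
    rfl

-- the main loop equivalence
theorem pvEmit_eq (cs : List Char) (rs : List (Nat × Nat)) (hch : pvChained cs.length 0 rs) :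
    ∀ f i r out, cs.length - i ≤ f → r ≤ rs.length →
      (∀ q, q < r → (rs.getD q (0,0)).2 ≤ i) →
      pvEmitA cs rs f i out = pvEmitB cs rs f i r out := by
  intro f
  induction f with
  | zero =>
    intro i r out h1 _ _
    have hge : ¬ i < cs.length := by omega
    simp only [pvEmitA, pvEmitB]
  | succ f ih =>
    intro i r out h1 hr hinv
    by_cases hin : i < cs.length
    · have hsk := pvSkipB_spec rs i (rs.length - r) r (le_refl _) hr
      set r' := pvSkipB rs i (rs.length - r) r with hr'def
      have hinv' : ∀ q, q < r' → (rs.getD q (0,0)).2 ≤ i := by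
        intro q hq
        by_cases hqr : q < r
        · exact hinv q hqr
        · exact hsk.2.2.1 q (by omega) hq
      by_cases hcov : r' < rs.length ∧ (rs.getD r' (0,0)).1 ≤ i
      · -- inside a code span: A walks it char by char, B copies the slice
        have hie : i < (rs.getD r' (0,0)).2 := hsk.2.2.2 hcov.1
        have hic : pvInCode rs i = true :=
          (pvInCode_iff rs i).mpr ⟨r', hcov.1, hcov.2, hie⟩
        have hgd := pvChained_getD hch r' hcov.1
        have hcode : ∀ j, (rs.getD r' (0,0)).1 ≤ j → j < (rs.getD r' (0,0)).2 → pvInCode rs j = true :=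
          fun j hj1 hj2 => (pvInCode_iff rs j).mpr ⟨r', hcov.1, hj1, hj2⟩
        have hk : i + ((rs.getD r' (0,0)).2 - i) = (rs.getD r' (0,0)).2 := by omega
        have hA : pvEmitA cs rs (f+1) i out =
            pvEmitA cs rs (f + 1 - ((rs.getD r' (0,0)).2 - i)) (rs.getD r' (0,0)).2
              (out ++ (cs.drop i).take ((rs.getD r' (0,0)).2 - i)) := by
          have h := pvEmitA_span cs rs r' hcov.1 hcode hgd.2.2 ((rs.getD r' (0,0)).2 - i)
            (f + 1 - ((rs.getD r' (0,0)).2 - i)) i out hcov.2 hk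
          rwa [show (f + 1 - ((rs.getD r' (0,0)).2 - i)) + ((rs.getD r' (0,0)).2 - i) = f + 1 by omega] at h
        have hB : pvEmitB cs rs (f+1) i r out =
            pvEmitB cs rs f (rs.getD r' (0,0)).2 r'
              (out ++ PySem.List.slice cs (some (i : Int)) (some ((rs.getD r' (0,0)).2 : Int))) := by
          simp only [pvEmitB]
          rw [if_pos hin, ← hr'def, if_pos hcov]
        have hslice : PySem.List.slice cs (some (i : Int)) (some ((rs.getD r' (0,0)).2 : Int)) =
            (cs.drop i).take ((rs.getD r' (0,0)).2 - i) := PySem.List.slice_natCast cs i _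
        rw [hA, hB, hslice,
          pvEmitA_fuel cs rs (f + 1 - ((rs.getD r' (0,0)).2 - i)) f (rs.getD r' (0,0)).2 _
            (by omega) (by omega)]
        exact ih (rs.getD r' (0,0)).2 r' _ (by omega) hsk.2.1
          (fun q hq => le_trans (hinv' q hq) (by omega))
      · -- outside every code span
        have hic : pvInCode rs i = false := by
          rw [Bool.eq_false_iff]
          intro hcontra
          obtain ⟨q, hq, hq1, hq2⟩ := (pvInCode_iff rs i).mp hcontra
          rcases lt_trichotomy q r' with hlt | heq | hgt
          · exact absurd (hinv' q hlt) (by omega)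
          · subst heq; exact hcov ⟨hq, hq1⟩
          · have hr'len : r' < rs.length := lt_trans hgt hq
            have hord := pvChained_order hch r' q hgt hq
            have := hsk.2.2.2 hr'len
            omega
        have hA1 : pvEmitA cs rs (f+1) i out =
            (if PySem.List.slice cs (some (i : Int)) (some ((i : Int) + 4)) = "<!--".toList ∧
               PySem.Chars.findFrom cs "-->".toList ((i : Int) + 4) none ≠ -1 then
              pvEmitA cs rs f ((PySem.Chars.findFrom cs "-->".toList ((i : Int) + 4) none).toNat + 3)
                (out ++ "{/* ".toList ++ PySem.Chars.strip (PySem.List.slice cs (some ((i : Int) + 4))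
                  (some (PySem.Chars.findFrom cs "-->".toList ((i : Int) + 4) none))) ++ " */}".toList)
            else if cs.getD i ' ' = '{' ∨ cs.getD i ' ' = '}' then
              pvEmitA cs rs f (i+1) (out ++ ['\\', cs.getD i ' '])
            else if cs.getD i ' ' = '<' then pvEmitA cs rs f (i+1) (out ++ "\\<".toList)
            else pvEmitA cs rs f (i+1) (out ++ [cs.getD i ' '])) := by
          simp only [pvEmitA]
          rw [if_pos hin, hic, if_neg Bool.false_ne_true]
        have hB1 : pvEmitB cs rs (f+1) i r out =
            (if cs.getD i ' ' = '<' ∧ PySem.List.slice cs (some (i : Int)) (some ((i : Int) + 4)) = "<!--".toList ∧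
               PySem.Chars.findFrom cs "-->".toList ((i : Int) + 4) none ≠ -1 then
              pvEmitB cs rs f ((PySem.Chars.findFrom cs "-->".toList ((i : Int) + 4) none).toNat + 3) r'
                (out ++ "{/* ".toList ++ PySem.Chars.strip (PySem.List.slice cs (some ((i : Int) + 4))
                  (some (PySem.Chars.findFrom cs "-->".toList ((i : Int) + 4) none))) ++ " */}".toList)
            else if cs.getD i ' ' = '<' ∧ PySem.List.slice cs (some (i : Int)) (some ((i : Int) + 4)) = "<!--".toList then
              pvEmitB cs rs f (i+1) r' (out ++ "\\<".toList)
            else if cs.getD i ' ' = '{' ∨ cs.getD i ' ' = '}' then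
              pvEmitB cs rs f (i+1) r' (out ++ ['\\', cs.getD i ' '])
            else if cs.getD i ' ' = '<' then pvEmitB cs rs f (i+1) r' (out ++ "\\<".toList)
            else pvEmitB cs rs f (i+1) r' (out ++ [cs.getD i ' '])) := by
          simp only [pvEmitB]
          rw [if_pos hin, ← hr'def, if_neg hcov]
        rw [hA1, hB1]
        have hih : ∀ i'' out'', i < i'' → pvEmitA cs rs f i'' out'' = pvEmitB cs rs f i'' r' out'' :=
          fun i'' out'' hi'' => ih i'' r' out'' (by omega) hsk.2.1
            (fun q hq => le_trans (hinv' q hq) (by omega))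
        by_cases hsl : PySem.List.slice cs (some (i : Int)) (some ((i : Int) + 4)) = "<!--".toList
        · have hw := pvCommentWindow cs i hsl
          by_cases hfd : PySem.Chars.findFrom cs "-->".toList ((i : Int) + 4) none ≠ -1
          · have ha := pvArrowGe cs i hw.1 hfd
            have hA2 : (PySem.List.slice cs (some (i : Int)) (some ((i : Int) + 4)) = "<!--".toList ∧ PySem.Chars.findFrom cs "-->".toList ((i : Int) + 4) none ≠ -1) := ⟨hsl, hfd⟩
            have hB2 : (cs.getD i ' ' = '<' ∧ PySem.List.slice cs (some (i : Int)) (some ((i : Int) + 4)) = "<!--".toList ∧ PySem.Chars.findFrom cs "-->".toList ((i : Int) + 4) none ≠ -1) := ⟨hw.2, hsl, hfd⟩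
            rw [if_pos hA2, if_pos hB2]
            exact hih _ _ (by omega)
          · have hA2 : ¬(PySem.List.slice cs (some (i : Int)) (some ((i : Int) + 4)) = "<!--".toList ∧ PySem.Chars.findFrom cs "-->".toList ((i : Int) + 4) none ≠ -1) := fun hc => hfd hc.2
            have hB2 : ¬(cs.getD i ' ' = '<' ∧ PySem.List.slice cs (some (i : Int)) (some ((i : Int) + 4)) = "<!--".toList ∧ PySem.Chars.findFrom cs "-->".toList ((i : Int) + 4) none ≠ -1) := fun hc => hfd hc.2.2
            have hB3 : (cs.getD i ' ' = '<' ∧ PySem.List.slice cs (some (i : Int)) (some ((i : Int) + 4)) = "<!--".toList) := ⟨hw.2, hsl⟩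
            have hbr : ¬(cs.getD i ' ' = '{' ∨ cs.getD i ' ' = '}') := by rw [hw.2]; decide
            rw [if_neg hA2, if_neg hB2, if_pos hB3, if_neg hbr, if_pos hw.2]
            exact hih _ _ (by omega)
        · have hA2 : ¬(PySem.List.slice cs (some (i : Int)) (some ((i : Int) + 4)) = "<!--".toList ∧ PySem.Chars.findFrom cs "-->".toList ((i : Int) + 4) none ≠ -1) := fun hc => hsl hc.1
          have hB2 : ¬(cs.getD i ' ' = '<' ∧ PySem.List.slice cs (some (i : Int)) (some ((i : Int) + 4)) = "<!--".toList ∧ PySem.Chars.findFrom cs "-->".toList ((i : Int) + 4) none ≠ -1) := fun hc => hsl hc.2.1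
          have hB3 : ¬(cs.getD i ' ' = '<' ∧ PySem.List.slice cs (some (i : Int)) (some ((i : Int) + 4)) = "<!--".toList) := fun hc => hsl hc.2
          rw [if_neg hA2, if_neg hB2, if_neg hB3]
          by_cases hbr : cs.getD i ' ' = '{' ∨ cs.getD i ' ' = '}'
          · rw [if_pos hbr, if_pos hbr]
            exact hih _ _ (by omega)
          · rw [if_neg hbr, if_neg hbr]
            by_cases hlt : cs.getD i ' ' = '<'
            · rw [if_pos hlt, if_pos hlt]
              exact hih _ _ (by omega)
            · rw [if_neg hlt, if_neg hlt]
              exact hih _ _ (by omega)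
    · simp only [pvEmitA, pvEmitB, if_neg hin]

-- ===== VERDICT (by name: the statement is the Claim_ definition above) =====
theorem escape_mdx_line_spec : Claim_equal_escape_mdx_line := by
  intro line _
  unfold Spec_escape_mdx_line escape_mdx_line escape_mdx_line_alt
  split
  · rfl
  · show String.ofList (pvEmitA line.toList (pvScanA line.toList (line.toList.length + 1) 0 [])
        (line.toList.length + 1) 0 []) =
      String.ofList (pvEmitB line.toList
        (pvScanB line.toList (line.toList.length + 1) (PySem.Chars.find line.toList ['`']) [])
        (line.toList.length + 1) 0 0 [])
    rw [pvScanB_eq]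
    obtain ⟨new, hnew, hch⟩ := pvScanA_chained line.toList (line.toList.length + 1) 0 [] (by omega)
    have hch0 : pvChained line.toList.length 0 (pvScanA line.toList (line.toList.length + 1) 0 []) := by
      rw [hnew, List.nil_append]; exact hch
    rw [pvEmit_eq line.toList _ hch0 _ 0 0 [] (by omega) (by omega)
      (fun q hq => absurd hq (Nat.not_lt_zero q))]
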